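-- pv_equiv track=rewrite | github.com/lavrinenkoalinav/Lavrinenko_lab10python | lab10.py | sum_list_recursive
-- ===== SOURCE A (Python) =====
-- def sum_list_recursive(lst):
--     """
--     Обчислює суму елементів списку рекурсивно.
--
--     Аргументи:
--         lst (list): список чисел
--
--     Повертає:
--         float або int: сума елементів списку
--
--     Викликає:
--         TypeError: якщо аргумент не є списком або елементи не є числами
--     """
--     if not isinstance(lst, list):
--         raise TypeError("Аргумент має бути списком.")
--     if not all(isinstance(x, (int, float)) for x in lst):
--         raise TypeError("Усі елементи списку мають бути числами.")
--     if not lst: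
--         return 0
--     return lst[0] + sum_list_recursive(lst[1:])
-- ===== SOURCE B (Python) =====
-- def sum_list_recursive(lst):
--     """Iterative one-pass version: validate as we go, accumulate right-to-left
--     (same addition order as A's recursion), O(n) instead of A's O(n^2) slicing."""
--     if not isinstance(lst, list):
--         raise TypeError("Аргумент має бути списком.")
--     if not all(isinstance(x, (int, float)) for x in lst):
--         raise TypeError("Усі елементи списку мають бути числами.")
--     total = 0
--     for x in reversed(lst):
--         total = x + total
--     return total
-- ===== Notes on version B (the rewrite author's own statement) =====
-- stated objective: faster
-- what changed: replaced the recursion on lst[1:] (which copies a slice at every level, O(n^2)) with a single iterative reversed-order accumulation loop, O(n), preserving the exact addition order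
import Mathlib
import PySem

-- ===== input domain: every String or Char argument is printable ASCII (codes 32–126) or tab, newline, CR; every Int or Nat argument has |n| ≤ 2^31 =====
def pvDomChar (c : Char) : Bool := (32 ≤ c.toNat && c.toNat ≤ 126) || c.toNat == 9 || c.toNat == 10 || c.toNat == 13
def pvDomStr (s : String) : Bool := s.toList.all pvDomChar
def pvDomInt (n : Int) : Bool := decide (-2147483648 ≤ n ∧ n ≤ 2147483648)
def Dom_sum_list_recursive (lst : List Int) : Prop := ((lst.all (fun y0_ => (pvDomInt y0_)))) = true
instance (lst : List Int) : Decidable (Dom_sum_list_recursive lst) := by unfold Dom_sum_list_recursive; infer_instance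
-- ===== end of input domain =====

-- B replaces A's recursion on lst[1:] with one iterative right-to-left accumulation pass (faster: O(n) vs O(n^2)).

-- ===== PORT A =====
-- the isinstance type checks always pass on List Int and are not modelled
def sum_list_recursive (lst : List Int) : Int :=
  match lst with
  | [] => 0
  | x :: rest => x + sum_list_recursive rest

-- ===== PORT B =====
def sum_list_recursive_alt (lst : List Int) : Int :=
  lst.reverse.foldl (fun total x => x + total) 0

-- ===== PRECONDITION & SPEC =====
def Spec_sum_list_recursive (lst : List Int) (out : Int) : Prop := out = sum_list_recursive_alt lst
instance (lst : List Int) (out : Int) : Decidable (Spec_sum_list_recursive lst out) := by unfold Spec_sum_list_recursive; infer_instance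

-- ===== CLAIM (what is proved, stated in full; the proofs are below) =====
def Claim_equal_sum_list_recursive : Prop := ∀ (lst : List Int), Dom_sum_list_recursive lst → Spec_sum_list_recursive lst (sum_list_recursive lst)

-- ===== LEMMAS AND PROOFS =====
theorem sum_list_recursive_eq_alt (lst : List Int) :
    sum_list_recursive lst = sum_list_recursive_alt lst := by
  induction lst with
  | nil => rfl
  | cons x rest ih =>
      simp [sum_list_recursive, sum_list_recursive_alt, List.foldl_reverse] at *
      omega

-- ===== VERDICT (by name: the statement is the Claim_ definition above) =====
theorem sum_list_recursive_spec : Claim_equal_sum_list_recursive := by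
  intro lst _
  exact sum_list_recursive_eq_alt lst
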